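-- pv_equiv track=rewrite | github.com/Dngallar/Python-Scripts-collection | Functions_3.py | LCS_auxMain
-- ===== SOURCE A (Python) =====
-- def LCS_auxMain(S, T):
--     if S == '' or T == '':
--             return ''
--     elif S[0] == T[0]:
--         return S[0] + LCS_auxMain(S[1:], T[1:])
--     else:
--         if len(S) >= len(T):
--             return LCS_auxMain(S[1:], T)
--         elif len(S) < len(T):
--             return LCS_auxMain(S, T[1:])
-- ===== SOURCE B (Python) =====
-- def LCS_auxMain(S, T):
--     i, j, n, m = 0, 0, len(S), len(T)
--     out = []
--     while i < n and j < m: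
--         if S[i] == T[j]:
--             out.append(S[i])
--             i += 1
--             j += 1
--         elif n - i >= m - j:
--             i += 1
--         else:
--             j += 1
--     return ''.join(out)
-- ===== Notes on version B (the rewrite author's own statement) =====
-- stated objective: faster
-- what changed: Replaced the recursive version that rebuilds both strings by slicing at every step with an iterative two-pointer scan over indices that appends matches to a buffer and joins once.
import Mathlib
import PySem

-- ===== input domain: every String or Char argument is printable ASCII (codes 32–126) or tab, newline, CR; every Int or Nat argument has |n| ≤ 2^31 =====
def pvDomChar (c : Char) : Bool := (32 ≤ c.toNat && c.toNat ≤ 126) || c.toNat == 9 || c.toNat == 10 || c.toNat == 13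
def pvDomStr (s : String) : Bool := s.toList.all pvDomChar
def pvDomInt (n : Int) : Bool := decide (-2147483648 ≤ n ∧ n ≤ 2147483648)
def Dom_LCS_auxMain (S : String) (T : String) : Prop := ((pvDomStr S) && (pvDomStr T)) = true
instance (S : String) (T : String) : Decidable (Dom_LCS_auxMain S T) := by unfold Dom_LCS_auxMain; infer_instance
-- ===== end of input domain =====

-- B replaces A's recursive slice-rebuilding greedy scan with an iterative two-pointer
-- index scan accumulating matches; asymptotically faster, same return value.

-- ===== PORT A =====
-- A's recursion, step for step, over the character lists of S and T:
-- empty check, head comparison, then drop one char from the longer string.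
def LCS_auxA : List Char → List Char → List Char
  | [], _ => []
  | _ :: _, [] => []
  | a :: s, b :: t =>
    if a == b then a :: LCS_auxA s t
    else if (a :: s).length ≥ (b :: t).length then LCS_auxA s (b :: t)
    else LCS_auxA (a :: s) t
termination_by s t => s.length + t.length

def LCS_auxMain (S : String) (T : String) : String :=
  String.ofList (LCS_auxA S.toList T.toList)

-- ===== PORT B =====
-- B's while-loop: two indices i, j and an output buffer, joined at the end.
def LCS_auxB (s t : List Char) (i j : Nat) (acc : List Char) : List Char :=
  if h : i < s.length ∧ j < t.length then
    if s[i]'h.1 == t[j]'h.2 then LCS_auxB s t (i + 1) (j + 1) (acc ++ [s[i]'h.1])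
    else if s.length - i ≥ t.length - j then LCS_auxB s t (i + 1) j acc
    else LCS_auxB s t i (j + 1) acc
  else acc
termination_by (s.length - i) + (t.length - j)
decreasing_by all_goals omega

def LCS_auxMain_alt (S : String) (T : String) : String :=
  String.ofList (LCS_auxB S.toList T.toList 0 0 [])

-- ===== PRECONDITION & SPEC =====
def Spec_LCS_auxMain (S : String) (T : String) (out : String) : Prop := out = LCS_auxMain_alt S T
instance (S : String) (T : String) (out : String) : Decidable (Spec_LCS_auxMain S T out) := by unfold Spec_LCS_auxMain; infer_instance

-- ===== CLAIM (what is proved, stated in full; the proofs are below) =====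
def Claim_equal_LCS_auxMain : Prop := ∀ (S : String) (T : String), Dom_LCS_auxMain S T → Spec_LCS_auxMain S T (LCS_auxMain S T)

-- ===== LEMMAS AND PROOFS =====

theorem LCS_auxA_nil_right : ∀ (s : List Char), LCS_auxA s [] = [] := by
  intro s; cases s <;> simp [LCS_auxA]

-- loop invariant: B's loop from indices (i, j) computes acc ++ A's result on the suffixes
theorem LCS_auxB_eq (n : Nat) : ∀ (s t : List Char) (i j : Nat) (acc : List Char),
    (s.length - i) + (t.length - j) ≤ n →
    LCS_auxB s t i j acc = acc ++ LCS_auxA (s.drop i) (t.drop j) := by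
  induction n with
  | zero =>
    intro s t i j acc h
    have hi : ¬ i < s.length := by omega
    rw [LCS_auxB]
    simp only [dif_neg (by omega : ¬ (i < s.length ∧ j < t.length))]
    rw [List.drop_eq_nil_of_le (by omega)]
    simp [LCS_auxA]
  | succ n ih =>
    intro s t i j acc h
    rw [LCS_auxB]
    by_cases hc : i < s.length ∧ j < t.length
    · obtain ⟨hi, hj⟩ := hc
      rw [dif_pos ⟨hi, hj⟩]
      have hs : s.drop i = s[i] :: s.drop (i + 1) := List.drop_eq_getElem_cons hi
      have ht : t.drop j = t[j] :: t.drop (j + 1) := List.drop_eq_getElem_cons hj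
      have hls : (s.drop i).length = s.length - i := List.length_drop ..
      have hlt : (t.drop j).length = t.length - j := List.length_drop ..
      by_cases he : s[i] == t[j]
      · rw [if_pos he, ih s t (i+1) (j+1) _ (by omega), hs, ht]
        simp only [LCS_auxA, if_pos he, List.append_assoc, List.cons_append, List.nil_append]
      · rw [if_neg he]
        by_cases hl : s.length - i ≥ t.length - j
        · rw [if_pos hl, ih s t (i+1) j _ (by omega), hs, ht]
          have : (s[i] :: s.drop (i+1)).length ≥ (t[j] :: t.drop (j+1)).length := by
            simp only [List.length_cons]
            rw [List.length_drop, List.length_drop]; omega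
          simp only [LCS_auxA, if_neg he, if_pos this]
        · rw [if_neg hl, ih s t i (j+1) _ (by omega), hs, ht]
          have : ¬ (s[i] :: s.drop (i+1)).length ≥ (t[j] :: t.drop (j+1)).length := by
            simp only [List.length_cons]
            rw [List.length_drop, List.length_drop]; omega
          simp only [LCS_auxA, if_neg he, if_neg this]
    · rw [dif_neg hc]
      rcases not_and_or.mp hc with hi | hj
      · rw [List.drop_eq_nil_of_le (by omega)]; simp [LCS_auxA]
      · rw [show t.drop j = [] from List.drop_eq_nil_of_le (by omega)]
        simp [LCS_auxA_nil_right]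

-- ===== VERDICT (by name: the statement is the Claim_ definition above) =====
theorem LCS_auxMain_spec : Claim_equal_LCS_auxMain := by
  intro S T _
  unfold Spec_LCS_auxMain LCS_auxMain LCS_auxMain_alt
  rw [LCS_auxB_eq (S.toList.length + T.toList.length) _ _ 0 0 [] (by omega)]
  simp
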